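-- pv_equiv track=rewrite | github.com/NathanZaldivar/regspy | regexgen.py | safe_unescape
-- ===== SOURCE A (Python) =====
-- def safe_unescape(pattern: str) -> str:
--     """
--     Safely unescape double-escaped regex metacharacters from LLM output.
--     Only unescapes known regex sequences to avoid breaking valid patterns.
--     """
--     if not pattern or '\\\\' not in pattern:
--         return pattern
--
--     # Only unescape recognized regex metacharacter sequences
--     # e.g., \\\\d -> \\d, \\\\w -> \\w, etc.
--     metachar_escapes = ['d', 'D', 'w', 'W', 's', 'S', 'b', 'B', 'n', 't', 'r', 'A', 'Z']
--     result = pattern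
--     for char in metachar_escapes:
--         result = result.replace(f'\\\\{char}', f'\\{char}')
--
--     return result
-- ===== SOURCE B (Python) =====
-- def safe_unescape(pattern: str) -> str:
--     """Single left-to-right pass: collapse a double backslash + known metachar into backslash + metachar."""
--     metachars = frozenset('dDwWsSbBntrAZ')
--     out = []
--     i = 0
--     n = len(pattern)
--     while i < n:
--         if pattern[i] == '\\' and i + 2 < n and pattern[i + 1] == '\\' and pattern[i + 2] in metachars:
--             out.append('\\')
--             out.append(pattern[i + 2])
--             i += 3
--         else:
--             out.append(pattern[i])
--             i += 1
--     return ''.join(out)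
-- ===== Notes on version B (the rewrite author's own statement) =====
-- stated objective: alternative
-- what changed: Replaced thirteen sequential full-string str.replace passes with one left-to-right scan that collapses a double backslash followed by a known metacharacter in a single traversal.
import Mathlib
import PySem

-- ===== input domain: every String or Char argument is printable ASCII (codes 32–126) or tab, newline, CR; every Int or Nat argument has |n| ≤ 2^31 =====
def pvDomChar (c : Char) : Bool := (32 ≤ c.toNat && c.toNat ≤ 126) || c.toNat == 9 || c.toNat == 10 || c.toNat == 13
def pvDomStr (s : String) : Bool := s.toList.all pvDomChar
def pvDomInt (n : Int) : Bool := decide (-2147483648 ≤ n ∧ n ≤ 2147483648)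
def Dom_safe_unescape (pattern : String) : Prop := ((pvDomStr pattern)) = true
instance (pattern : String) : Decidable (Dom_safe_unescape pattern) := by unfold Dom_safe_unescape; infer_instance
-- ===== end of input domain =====

-- B replaces A's thirteen sequential full-string str.replace passes by ONE left-to-right
-- scan collapsing '\'+'\'+metachar into '\'+metachar (alternative single-pass algorithm);
-- the return values are proved equal on all inputs.

-- ===== PORT A =====
-- the 13 metacharacter letters, in A's order
def pvMeta : List Char := ['d', 'D', 'w', 'W', 's', 'S', 'b', 'B', 'n', 't', 'r', 'A', 'Z']

def safe_unescape (pattern : String) : String :=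
  if pattern.isEmpty || !(PySem.Str.isIn "\\\\" pattern) then pattern
  else
    pvMeta.foldl
      (fun result c =>
        PySem.Str.replace result (String.ofList ['\\', '\\', c]) (String.ofList ['\\', c]))
      pattern

-- ===== PORT B =====
-- B's while-loop: look at the next three characters; on '\','\',metachar emit '\'+letter
-- and advance 3, otherwise emit one character and advance 1.
def pvScan (cs : List Char) : List Char → List Char
  | [] => []
  | [a] => [a]
  | [a, b] => [a, b]
  | a :: b :: d :: t =>
    if a = '\\' ∧ b = '\\' ∧ d ∈ cs then '\\' :: d :: pvScan cs t
    else a :: pvScan cs (b :: d :: t)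
termination_by l => l.length
decreasing_by all_goals (simp only [List.length_cons]; omega)

def safe_unescape_alt (pattern : String) : String :=
  String.ofList (pvScan pvMeta pattern.toList)

-- ===== PRECONDITION & SPEC =====
def Spec_safe_unescape (pattern : String) (out : String) : Prop := out = safe_unescape_alt pattern
instance (pattern : String) (out : String) : Decidable (Spec_safe_unescape pattern out) := by unfold Spec_safe_unescape; infer_instance

-- ===== CLAIM (what is proved, stated in full; the proofs are below) =====
def Claim_equal_safe_unescape : Prop := ∀ (pattern : String), Dom_safe_unescape pattern → Spec_safe_unescape pattern (safe_unescape pattern)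

-- ===== LEMMAS AND PROOFS =====

-- structural reading of one str.replace pass with old = ['\','\',c], new = ['\',c]
def pvRep (c : Char) : List Char → List Char
  | [] => []
  | [a] => [a]
  | [a, b] => [a, b]
  | a :: b :: d :: t =>
    if a = '\\' ∧ b = '\\' ∧ d = c then '\\' :: c :: pvRep c t
    else a :: pvRep c (b :: d :: t)
termination_by l => l.length
decreasing_by all_goals (simp only [List.length_cons]; omega)

theorem pvRep_cons1 (c x : Char) (X : List Char) (hx : x ≠ '\\') :
    pvRep c (x :: X) = x :: pvRep c X := by
  match X with
  | [] => simp [pvRep]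
  | [b] => simp [pvRep]
  | b :: d :: t => rw [pvRep, if_neg (fun h => hx h.1)]

theorem pvRep_cons2 (c x : Char) (X : List Char) (hx : x ≠ '\\') :
    pvRep c ('\\' :: x :: X) = '\\' :: x :: pvRep c X := by
  match X with
  | [] => simp [pvRep]
  | y :: Y =>
    rw [pvRep, if_neg (fun h => hx h.2.1), pvRep_cons1 c x (y :: Y) hx]

theorem pvScan_cons1 (cs : List Char) (x : Char) (X : List Char) (hx : x ≠ '\\') :
    pvScan cs (x :: X) = x :: pvScan cs X := by
  match X with
  | [] => simp [pvScan]
  | [b] => simp [pvScan]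
  | b :: d :: t => rw [pvScan, if_neg (fun h => hx h.1)]

theorem pvScan_cons2 (cs : List Char) (x : Char) (X : List Char) (hx : x ≠ '\\') :
    pvScan cs ('\\' :: x :: X) = '\\' :: x :: pvScan cs X := by
  match X with
  | [] => simp [pvScan]
  | y :: Y =>
    rw [pvScan, if_neg (fun h => hx h.2.1), pvScan_cons1 cs x (y :: Y) hx]

theorem pvScan_head (cs : List Char) (l : List Char) :
    (pvScan cs l).head? = l.head? := by
  match l with
  | [] => simp [pvScan]
  | [a] => simp [pvScan]
  | [a, b] => simp [pvScan]
  | a :: b :: d :: t =>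
    rw [pvScan]
    split
    · next h => simp [h.1]
    · simp

-- the first two characters of pvScan cs ('\'::'\'::t): backslash, then never c (c ∉ cs, c ≠ '\')
theorem pvScan_bb_shape (cs : List Char) (c : Char) (t : List Char)
    (hc : c ≠ '\\') (hccs : c ∉ cs) :
    ∃ w2 W', pvScan cs ('\\' :: '\\' :: t) = '\\' :: w2 :: W' ∧ w2 ≠ c := by
  match t with
  | [] => exact ⟨'\\', [], by simp [pvScan], fun h => hc h.symm⟩
  | e :: r =>
    by_cases he : e ∈ cs
    · exact ⟨e, pvScan cs r, by rw [pvScan, if_pos ⟨rfl, rfl, he⟩], fun h => hccs (h ▸ he)⟩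
    · have hW : (pvScan cs ('\\' :: e :: r)).head? = some '\\' := by
        rw [pvScan_head]; rfl
      obtain ⟨X', hX'⟩ : ∃ X', pvScan cs ('\\' :: e :: r) = '\\' :: X' := by
        match hX : pvScan cs ('\\' :: e :: r) with
        | [] => rw [hX] at hW; simp at hW
        | y :: Y =>
          rw [hX] at hW
          simp only [List.head?_cons, Option.some.injEq] at hW
          exact ⟨Y, by rw [hW]⟩
      refine ⟨'\\', X', ?_, fun h => hc h.symm⟩
      rw [pvScan, if_neg (fun h => he h.2.2), hX']

-- core composition: one more replace pass after scanning for cs = scanning for cs ++ [c]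
theorem pvRep_pvScan (c : Char) (cs : List Char)
    (hc : c ≠ '\\') (hccs : c ∉ cs) (hcs : ∀ c' ∈ cs, c' ≠ '\\') :
    ∀ n (l : List Char), l.length ≤ n → pvRep c (pvScan cs l) = pvScan (cs ++ [c]) l := by
  intro n
  induction n with
  | zero =>
    intro l hl
    have h0 : l = [] := List.eq_nil_of_length_eq_zero (Nat.le_zero.mp hl)
    subst h0; simp [pvScan, pvRep]
  | succ n ih =>
    intro l hl
    match l with
    | [] => simp [pvScan, pvRep]
    | [a] => simp [pvScan, pvRep]
    | [a, b] => simp [pvScan, pvRep]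
    | a :: b :: d :: t =>
      simp only [List.length_cons] at hl
      by_cases hab : a = '\\' ∧ b = '\\'
      · obtain ⟨ha, hb⟩ := hab
        subst ha hb
        by_cases hd : d ∈ cs
        · -- match for a letter already in cs
          have hdne : d ≠ '\\' := hcs d hd
          rw [pvScan, if_pos ⟨rfl, rfl, hd⟩, pvRep_cons2 c d _ hdne, ih t (by omega)]
          rw [pvScan, if_pos ⟨rfl, rfl, List.mem_append_left _ hd⟩]
        · by_cases hdc : d = c
          · -- match for the new letter c
            subst hdc
            rw [pvScan, if_neg (fun h => hd h.2.2), pvScan_cons2 cs d t hc]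
            rw [pvRep, if_pos ⟨rfl, rfl, rfl⟩, ih t (by omega)]
            rw [pvScan, if_pos ⟨rfl, rfl, by simp⟩]
          · by_cases hdb : d = '\\'
            · -- three backslashes: emit one, recurse on the shorter suffix
              subst hdb
              have hbb : ('\\' : Char) ∉ cs := fun h => (hcs _ h) rfl
              rw [pvScan, if_neg (fun h => hbb h.2.2)]
              obtain ⟨w2, W', hW, hw2⟩ := pvScan_bb_shape cs c t hc hccs
              rw [hW, pvRep, if_neg (fun h => hw2 h.2.2), ← hW,
                ih ('\\' :: '\\' :: t) (by simp only [List.length_cons]; omega)]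
              have hbb' : ('\\' : Char) ∉ cs ++ [c] := by
                simp only [List.mem_append, List.mem_singleton]
                rintro (h | h)
                · exact hbb h
                · exact hc h.symm
              rw [pvScan, if_neg (fun h => hbb' h.2.2)]
            · -- double backslash + unknown letter: nobody matches
              rw [pvScan, if_neg (fun h => hd h.2.2), pvScan_cons2 cs d t hdb,
                pvRep, if_neg (fun h => hdc h.2.2), pvRep_cons2 c d _ hdb, ih t (by omega)]
              have hd' : d ∉ cs ++ [c] := by
                simp only [List.mem_append, List.mem_singleton]
                rintro (h | h)
                · exact hd h
                · exact hdc h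
              rw [pvScan, if_neg (fun h => hd' h.2.2), pvScan_cons2 (cs ++ [c]) d t hdb]
      · -- no match at the head for anybody: emit one character
        have hab' : ∀ (P : Prop), ¬ (a = '\\' ∧ b = '\\' ∧ P) := fun _ h => hab ⟨h.1, h.2.1⟩
        rw [pvScan, if_neg (hab' _)]
        by_cases ha : a = '\\'
        · subst ha
          have hb : b ≠ '\\' := fun h => hab ⟨rfl, h⟩
          rw [pvScan_cons1 cs b (d :: t) hb, pvRep_cons2 c b _ hb,
            ih (d :: t) (by simp only [List.length_cons]; omega)]
          rw [pvScan, if_neg (hab' _), pvScan_cons1 (cs ++ [c]) b (d :: t) hb]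
        · rw [pvRep_cons1 c a _ ha, ih (b :: d :: t) (by simp only [List.length_cons]; omega)]
          rw [pvScan, if_neg (hab' _)]

theorem pvScan_nil (l : List Char) : pvScan [] l = l := by
  match l with
  | [] => simp [pvScan]
  | [a] => simp [pvScan]
  | [a, b] => simp [pvScan]
  | a :: b :: d :: t =>
    rw [pvScan, if_neg (by simp), pvScan_nil (b :: d :: t)]
termination_by l.length
decreasing_by simp only [List.length_cons]; omega

theorem pvScan_no_bb (cs : List Char) (l : List Char)
    (h : ¬ ['\\', '\\'] <:+: l) : pvScan cs l = l := by
  match l with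
  | [] => simp [pvScan]
  | [a] => simp [pvScan]
  | [a, b] => simp [pvScan]
  | a :: b :: d :: t =>
    have hm : ¬ (a = '\\' ∧ b = '\\' ∧ d ∈ cs) := fun hm =>
      h (List.IsPrefix.isInfix ⟨d :: t, by simp [hm.1, hm.2.1]⟩)
    rw [pvScan, if_neg hm,
      pvScan_no_bb cs (b :: d :: t)
        (fun hi => h (hi.trans (List.suffix_cons a (b :: d :: t)).isInfix))]
termination_by l.length
decreasing_by simp only [List.length_cons]; omega

theorem pvReplace_eq_pvRep_go (c : Char) :
    ∀ fuel (l acc : List Char), l.length ≤ fuel →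
      PySem.Chars.replace.go ['\\', '\\', c] ['\\', c] fuel l acc = acc.reverse ++ pvRep c l := by
  intro fuel
  induction fuel with
  | zero =>
    intro l acc hl
    have h0 : l = [] := List.eq_nil_of_length_eq_zero (Nat.le_zero.mp hl)
    subst h0
    simp [PySem.Chars.replace.go, pvRep]
  | succ n ih =>
    intro l acc hl
    match l with
    | [] => simp [PySem.Chars.replace.go, pvRep]
    | a :: t =>
      rw [PySem.Chars.replace.go]
      simp only [List.length_cons] at hl
      by_cases hp : List.isPrefixOf ['\\', '\\', c] (a :: t)
      · rw [if_pos hp]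
        match t with
        | [] => simp [List.isPrefixOf] at hp
        | [x] => simp [List.isPrefixOf] at hp
        | x :: y :: r =>
          simp only [List.isPrefixOf, Bool.and_eq_true, beq_iff_eq, and_true] at hp
          obtain ⟨ha, hx, hy⟩ := hp
          subst ha hx hy
          have hdrop : List.drop (['\\', '\\', c].length) ('\\' :: '\\' :: c :: r) = r := by simp
          rw [hdrop, ih r _ (by simp only [List.length_cons] at hl; omega)]
          rw [pvRep, if_pos ⟨rfl, rfl, rfl⟩]
          simp
      · rw [if_neg hp, ih t _ (by omega)]
        have hstep : pvRep c (a :: t) = a :: pvRep c t := by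
          match t with
          | [] => simp [pvRep]
          | [x] => simp [pvRep]
          | x :: y :: r =>
            rw [pvRep, if_neg (fun hm => hp (by
              simp only [List.isPrefixOf, Bool.and_eq_true, beq_iff_eq, and_true]
              exact ⟨hm.1.symm, hm.2.1.symm, hm.2.2.symm⟩))]
        rw [hstep]
        simp

theorem pvReplace_eq_pvRep (c : Char) (l : List Char) :
    PySem.Chars.replace l ['\\', '\\', c] ['\\', c] = pvRep c l := by
  rw [PySem.Chars.replace, if_neg (by simp)]
  simpa using pvReplace_eq_pvRep_go c l.length l [] le_rfl

theorem pvFoldRep_eq_pvScan (cs : List Char) (hnd : cs.Nodup) (hbs : ∀ c ∈ cs, c ≠ '\\') :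
    ∀ l : List Char, cs.foldl (fun r c => pvRep c r) l = pvScan cs l := by
  induction cs using List.reverseRecOn with
  | nil => intro l; simp [pvScan_nil]
  | append_singleton cs c ih =>
    intro l
    rw [List.foldl_append]
    simp only [List.foldl_cons, List.foldl_nil]
    have hnd' : cs.Nodup := (List.nodup_append.mp hnd).1
    have hbs' : ∀ c' ∈ cs, c' ≠ '\\' := fun c' h => hbs c' (List.mem_append_left _ h)
    rw [ih hnd' hbs']
    have hccs : c ∉ cs := by
      intro hmem
      have hnda := List.nodup_append.mp hnd
      exact hnda.2.2 c hmem c (by simp) rfl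
    exact pvRep_pvScan c cs (hbs c (by simp)) hccs hbs' l.length l le_rfl

theorem pvStrFold_toList (cs : List Char) :
    ∀ s : String,
      (cs.foldl
        (fun result c =>
          PySem.Str.replace result (String.ofList ['\\', '\\', c]) (String.ofList ['\\', c]))
        s).toList = cs.foldl (fun r c => pvRep c r) s.toList := by
  induction cs with
  | nil => intro s; simp
  | cons c cs ih =>
    intro s
    simp only [List.foldl_cons]
    rw [ih]
    congr 1
    rw [PySem.Str.toList_replace]
    simp [pvReplace_eq_pvRep]

theorem pvToListBB : "\\\\".toList = ['\\', '\\'] := by decide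

-- ===== VERDICT (by name: the statement is the Claim_ definition above) =====
set_option maxRecDepth 10000 in
theorem safe_unescape_spec : Claim_equal_safe_unescape := by
  intro pattern _
  unfold Spec_safe_unescape safe_unescape safe_unescape_alt
  split
  · next hguard =>
    have hnb : ¬ ['\\', '\\'] <:+: pattern.toList := by
      intro hi
      have hne : pattern.toList ≠ [] := by
        intro h
        rw [h] at hi
        simp at hi
      have hie : pattern.isEmpty = false := by
        cases hE : pattern.isEmpty
        · rfl
        · exact absurd (by simpa using String.isEmpty_iff.mp hE) hne
      rw [hie] at hguard
      simp only [Bool.false_or, Bool.not_eq_true'] at hguard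
      have hIn : PySem.Str.isIn "\\\\" pattern = true := by
        rw [PySem.Str.isIn_iff_infix, pvToListBB]; exact hi
      rw [hIn] at hguard
      exact Bool.noConfusion hguard
    rw [pvScan_no_bb pvMeta pattern.toList hnb]
    simp
  · have hlist :
        (pvMeta.foldl
          (fun result c =>
            PySem.Str.replace result (String.ofList ['\\', '\\', c]) (String.ofList ['\\', c]))
          pattern).toList = pvScan pvMeta pattern.toList := by
      rw [pvStrFold_toList]
      exact pvFoldRep_eq_pvScan pvMeta (by simp [pvMeta])
        (by intro x hx; simp only [pvMeta, List.mem_cons, List.not_mem_nil, or_false] at hx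
            rcases hx with h|h|h|h|h|h|h|h|h|h|h|h|h <;> subst h <;> decide)
        pattern.toList
    calc pvMeta.foldl
          (fun result c =>
            PySem.Str.replace result (String.ofList ['\\', '\\', c]) (String.ofList ['\\', c]))
          pattern
        = String.ofList ((pvMeta.foldl
            (fun result c =>
              PySem.Str.replace result (String.ofList ['\\', '\\', c]) (String.ofList ['\\', c]))
            pattern).toList) := by simp
      _ = String.ofList (pvScan pvMeta pattern.toList) := by rw [hlist]
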